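-- pv_equiv track=rewrite | github.com/liem18112000-axon/luz-skills-plugin | skills/prompt/prompt-compress/scripts/protect.py | _label_to_idx
-- ===== SOURCE A (Python) =====
-- def _label_to_idx(label: str) -> int:
--     if len(set(label)) != 4:
--         return -1  # not all distinct → not a valid sentinel
--     available = list(range(26))
--     n = 0
--     multiplier = 1
--     for c in label:
--         idx = ord(c) - ord("A")
--         try:
--             pos = available.index(idx)
--         except ValueError:
--             return -1
--         n += pos * multiplier
--         multiplier *= len(available)
--         available.pop(pos)
--     return n
-- ===== SOURCE B (Python) =====
-- def _label_to_idx(label: str) -> int: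
--     # Valid sentinels are exactly 4 distinct letters 'A'..'Z'; everything else is -1.
--     if len(label) != 4 or len(set(label)) != 4:
--         return -1
--     a, b, c, d = (ord(ch) - ord("A") for ch in label)
--     if min(a, b, c, d) < 0 or max(a, b, c, d) > 25:
--         return -1
--     # Loop-free factorial-number-system rank: radix weights 1, 26, 26*25, 26*25*24.
--     return (a
--             + 26 * (b - (a < b))
--             + 650 * (c - (a < c) - (b < c))
--             + 15600 * (d - (a < d) - (b < d) - (c < d)))
-- ===== Notes on version B (the rewrite author's own statement) =====
-- stated objective: alternative
-- what changed: B replaces A's character loop that mutates a 26-element available list (.index search, .pop, running multiplier) by a single up-front shape validation (exactly 4 distinct chars in 'A'..'Z') followed by one loop-free closed-form expression over the four code points with fixed radix weights 1, 26, 650, 15600 and boolean comparison terms.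
import Mathlib
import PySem

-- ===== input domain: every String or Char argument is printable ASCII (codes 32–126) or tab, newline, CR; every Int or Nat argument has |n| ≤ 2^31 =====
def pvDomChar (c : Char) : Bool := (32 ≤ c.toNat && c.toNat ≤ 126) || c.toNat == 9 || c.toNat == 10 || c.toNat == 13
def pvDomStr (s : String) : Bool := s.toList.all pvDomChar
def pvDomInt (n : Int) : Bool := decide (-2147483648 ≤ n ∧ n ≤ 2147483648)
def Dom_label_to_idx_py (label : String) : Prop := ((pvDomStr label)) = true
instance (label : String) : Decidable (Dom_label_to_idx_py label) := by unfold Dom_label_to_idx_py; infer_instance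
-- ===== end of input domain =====

-- B is loop-free: it validates the shape once (4 distinct chars, all 'A'..'Z') and then
-- computes the rank as one closed-form arithmetic expression over the four code points,
-- instead of A's loop mutating an `available` list; same return value, alternative decomposition.

-- ===== PORT A =====
-- loop over label's chars; state = (available, n, multiplier); `available.pop(pos)` for a valid
-- pos is exactly `eraseIdx pos`.
def pvALoop : List Char → List Int → Int → Int → Int
  | [], _, n, _ => n
  | c :: cs, avail, n, m =>
    let idx : Int := (c.toNat : Int) - 65
    match PySem.List.index? avail idx with
    | none => -1
    | some pos => pvALoop cs (avail.eraseIdx pos) (n + (pos : Int) * m) (m * (avail.length : Int))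

def label_to_idx_py (label : String) : Int :=
  if PySem.Set.len (PySem.Set.ofList label.toList) ≠ 4 then -1
  else pvALoop label.toList (List.map (fun a : Nat => (a : Int)) (List.range 26)) 0 1

-- ===== PORT B =====
-- Python bool used as int: (a < b) in arithmetic
def pvB2I (p : Prop) [Decidable p] : Int := if p then 1 else 0

def label_to_idx_py_alt (label : String) : Int :=
  if PySem.Str.len label ≠ 4 ∨ PySem.Set.len (PySem.Set.ofList label.toList) ≠ 4 then -1
  else
    match label.toList with
    | [ch0, ch1, ch2, ch3] =>
      let a : Int := (ch0.toNat : Int) - 65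
      let b : Int := (ch1.toNat : Int) - 65
      let c : Int := (ch2.toNat : Int) - 65
      let d : Int := (ch3.toNat : Int) - 65
      if min (min (min a b) c) d < 0 ∨ 25 < max (max (max a b) c) d then -1
      else a + 26 * (b - pvB2I (a < b))
             + 650 * (c - pvB2I (a < c) - pvB2I (b < c))
             + 15600 * (d - pvB2I (a < d) - pvB2I (b < d) - pvB2I (c < d))
    | _ => -1  -- unreachable: the guard forces exactly 4 chars

-- ===== PRECONDITION & SPEC =====
def Spec_label_to_idx_py (label : String) (out : Int) : Prop := out = label_to_idx_py_alt label
instance (label : String) (out : Int) : Decidable (Spec_label_to_idx_py label out) := by unfold Spec_label_to_idx_py; infer_instance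

-- ===== CLAIM (what is proved, stated in full; the proofs are below) =====
def Claim_equal_label_to_idx_py : Prop := ∀ (label : String), Dom_label_to_idx_py label → Spec_label_to_idx_py label (label_to_idx_py label)

-- ===== LEMMAS AND PROOFS =====

def pvIdx (c : Char) : Int := (c.toNat : Int) - 65

-- reference loop: A's loop with the available list abstracted to a used-index set
def pvCLoop : List Char → List Int → Int → Int → Int
  | [], _, n, _ => n
  | c :: cs, used, n, m =>
    let idx : Int := pvIdx c
    if idx < 0 ∨ 26 ≤ idx ∨ idx ∈ used then -1
    else pvCLoop cs (used ++ [idx])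
           (n + (idx - ((used.filter (fun u => decide (u < idx))).length : Int)) * m)
           (m * (26 - (used.length : Int)))

-- the abstract value of A's `available` list after the indices in `used` have been popped
def pvAvail (used : List Int) : List Int :=
  (List.map (fun a : Nat => (a : Int)) (List.range 26)).filter (fun j => decide (j ∉ used))

theorem pv_mem_R (j : Int) : j ∈ List.map (fun a : Nat => (a : Int)) (List.range 26) ↔ 0 ≤ j ∧ j < 26 := by
  simp only [List.mem_map, List.mem_range]
  constructor
  · rintro ⟨a, ha, rfl⟩; constructor <;> omega
  · rintro ⟨h0, h26⟩; exact ⟨j.toNat, by omega, by omega⟩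

theorem pv_nodup_R : (List.map (fun a : Nat => (a : Int)) (List.range 26)).Nodup :=
  List.nodup_range.map (fun a b h => by exact_mod_cast h)

theorem pv_mem_avail (used : List Int) (j : Int) :
    j ∈ pvAvail used ↔ (0 ≤ j ∧ j < 26) ∧ j ∉ used := by
  simp only [pvAvail, List.mem_filter, pv_mem_R, decide_eq_true_eq]

theorem pv_pairwise_avail (used : List Int) : (pvAvail used).Pairwise (· < ·) :=
  List.Pairwise.filter _
    (List.Pairwise.map _ (fun a b h => by exact_mod_cast h) List.pairwise_lt_range)

theorem pv_nodup_avail (used : List Int) : (pvAvail used).Nodup :=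
  (pv_pairwise_avail used).imp (fun h => ne_of_lt h)

-- position of an element of a strictly increasing list = number of smaller elements
theorem pv_index_sorted (l : List Int) (hl : l.Pairwise (· < ·)) (idx : Int) (h : idx ∈ l) :
    PySem.List.index? l idx = some ((l.filter (fun u => decide (u < idx))).length) := by
  induction l with
  | nil => cases h
  | cons x t ih =>
    rcases List.pairwise_cons.mp hl with ⟨hx, ht⟩
    by_cases hxe : x = idx
    · subst hxe
      have hf : List.filter (fun u => decide (u < x)) (x :: t) = [] := by
        apply List.filter_eq_nil_iff.mpr
        intro u hu
        rcases List.mem_cons.mp hu with rfl | hu'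
        · simp
        · simpa using not_lt.mpr (le_of_lt (hx u hu'))
      rw [hf]
      exact PySem.List.index?_cons_self x t
    · have hmem : idx ∈ t := by cases h with
        | head => exact absurd rfl hxe
        | tail _ h => exact h
      have hlt : x < idx := hx idx hmem
      rw [PySem.List.index?_cons_of_ne t hxe, ih ht hmem]
      simp [hlt]

-- generic counting: removing a nodup sublist from a nodup list
theorem pv_filter_not_mem_length (l used : List Int) (hl : l.Nodup) (hu : used.Nodup)
    (hsub : ∀ u ∈ used, u ∈ l) :
    (l.filter (fun j => decide (j ∉ used))).length + used.length = l.length := by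
  have hperm : (l.filter (fun j => decide (j ∈ used))).Perm used := by
    rw [List.perm_ext_iff_of_nodup (hl.filter _) hu]
    intro a
    simp only [List.mem_filter, decide_eq_true_eq]
    exact ⟨fun h => h.2, fun h => ⟨hsub a h, h⟩⟩
  have hsplit := List.length_eq_length_filter_add (l := l) (fun j => decide (j ∈ used))
  have hlen := hperm.length_eq
  have hcongr : l.filter (fun j => !decide (j ∈ used)) = l.filter (fun j => decide (j ∉ used)) :=
    List.filter_congr (fun x _ => by simp)
  rw [hcongr] at hsplit
  omega

theorem pv_len_avail (used : List Int) (hu : used.Nodup) (hb : ∀ u ∈ used, 0 ≤ u ∧ u < 26) :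
    (pvAvail used).length + used.length = 26 := by
  have := pv_filter_not_mem_length (List.map (fun a : Nat => (a : Int)) (List.range 26)) used
    pv_nodup_R hu (fun u hu' => (pv_mem_R u).mpr (hb u hu'))
  simpa [pvAvail] using this

-- length of {j ∈ range 26 | j < idx}
theorem pv_len_R_lt (idx : Int) (h0 : 0 ≤ idx) (h26 : idx < 26) :
    ((List.map (fun a : Nat => (a : Int)) (List.range 26)).filter
      (fun u => decide (u < idx))).length = idx.toNat := by
  rw [List.filter_map, List.length_map]
  simp only [Function.comp_def]
  have hc : (List.range 26).filter (fun a : Nat => decide ((a : Int) < idx)) =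
      (List.range 26).filter (fun a => decide (a < idx.toNat)) :=
    List.filter_congr (fun x _ => by simp only [decide_eq_decide]; omega)
  rw [hc]
  have hsplit : (26 : ℕ) = idx.toNat + (26 - idx.toNat) := by omega
  rw [hsplit, List.range_add, List.filter_append]
  have h1 : (List.range idx.toNat).filter (fun a => decide (a < idx.toNat)) = List.range idx.toNat :=
    List.filter_eq_self.mpr (fun a ha => by simp [List.mem_range.mp ha])
  have h2 : ((List.range (26 - idx.toNat)).map (fun a => idx.toNat + a)).filter
      (fun a => decide (a < idx.toNat)) = [] :=
    List.filter_eq_nil_iff.mpr (fun a ha => by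
      simp only [List.mem_map] at ha; obtain ⟨b, _, rfl⟩ := ha; simp)
  rw [h1, h2]
  simp

-- the counting rank equals A's list position
theorem pv_pos_eq (used : List Int) (idx : Int) (hu : used.Nodup)
    (hb : ∀ u ∈ used, 0 ≤ u ∧ u < 26) (h0 : 0 ≤ idx) (h26 : idx < 26) :
    (((pvAvail used).filter (fun u => decide (u < idx))).length : Int)
      = idx - ((used.filter (fun u => decide (u < idx))).length : Int) := by
  have key : ((pvAvail used).filter (fun u => decide (u < idx))).length
      + (used.filter (fun u => decide (u < idx))).length = idx.toNat := by
    have hRlt := pv_len_R_lt idx h0 h26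
    set Rlt := ((List.map (fun a : Nat => (a : Int)) (List.range 26)).filter
      (fun u => decide (u < idx))) with hR
    have h1 : (pvAvail used).filter (fun u => decide (u < idx)) =
        Rlt.filter (fun j => decide (j ∉ used.filter (fun u => decide (u < idx)))) := by
      rw [hR]
      simp only [pvAvail, List.filter_filter]
      apply List.filter_congr
      intro x _
      by_cases hx : x < idx <;> by_cases hm : x ∈ used <;> simp [hx, hm]
    have hnodupRlt : Rlt.Nodup := by rw [hR]; exact pv_nodup_R.filter _
    have hsub : ∀ u ∈ used.filter (fun u => decide (u < idx)), u ∈ Rlt := by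
      intro u hu'
      rw [List.mem_filter] at hu'
      rw [hR, List.mem_filter]
      refine ⟨(pv_mem_R u).mpr (hb u hu'.1), hu'.2⟩
    have hmain := pv_filter_not_mem_length Rlt (used.filter (fun u => decide (u < idx)))
      hnodupRlt (hu.filter _) hsub
    rw [← h1] at hmain
    omega
  omega

-- popping idx from the available list = filtering it out of the range
theorem pv_erase_avail (used : List Int) (idx : Int) (pos : ℕ)
    (hidx : PySem.List.index? (pvAvail used) idx = some pos) :
    (pvAvail used).eraseIdx pos = pvAvail (used ++ [idx]) := by
  have hpos : pos = (pvAvail used).idxOf idx := by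
    rw [PySem.List.index?_eq_idxOf?] at hidx
    rw [List.idxOf_eq_getD_idxOf?, hidx]; rfl
  rw [hpos, List.eraseIdx_idxOf_eq_erase, (pv_nodup_avail used).erase_eq_filter]
  simp only [pvAvail, List.filter_filter]
  apply List.filter_congr
  intro x _
  by_cases hm : x ∈ used <;> by_cases he : x = idx <;> simp [hm, he]

-- A's loop agrees with the reference loop
theorem pv_loop_eq (cs : List Char) : ∀ (used : List Int) (n m : Int), used.Nodup →
    (∀ u ∈ used, 0 ≤ u ∧ u < 26) →
    pvALoop cs (pvAvail used) n m = pvCLoop cs used n m := by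
  induction cs with
  | nil => intro used n m _ _; rfl
  | cons c cs ih =>
    intro used n m hu hb
    simp only [pvALoop, pvCLoop, pvIdx]
    split
    · rename_i hnone
      have hnm : (c.toNat : Int) - 65 ∉ pvAvail used :=
        (PySem.List.index?_eq_none_iff _ _).mp hnone
      rw [if_pos]
      by_contra hcond
      push_neg at hcond
      exact hnm ((pv_mem_avail used _).mpr ⟨⟨hcond.1, by omega⟩, hcond.2.2⟩)
    · rename_i pos hsome
      set idx : Int := (c.toNat : Int) - 65 with hidxdef
      have hmem : idx ∈ pvAvail used := by
        by_contra hnm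
        rw [(PySem.List.index?_eq_none_iff _ _).mpr hnm] at hsome
        cases hsome
      obtain ⟨⟨h0, h26⟩, hni⟩ := (pv_mem_avail used idx).mp hmem
      have hcond : ¬ (idx < 0 ∨ 26 ≤ idx ∨ idx ∈ used) := by
        push_neg; exact ⟨by omega, by omega, hni⟩
      rw [if_neg hcond]
      have hposval : (pos : Int) = idx - ((used.filter (fun u => decide (u < idx))).length : Int) := by
        rw [pv_index_sorted (pvAvail used) (pv_pairwise_avail used) idx hmem] at hsome
        cases hsome
        exact pv_pos_eq used idx hu hb h0 h26
      have hlen : ((pvAvail used).length : Int) = 26 - (used.length : Int) := by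
        have := pv_len_avail used hu hb; omega
      have hnodup' : (used ++ [idx]).Nodup := by
        rw [List.nodup_append]
        refine ⟨hu, List.nodup_singleton idx, ?_⟩
        intro a ha b hbmem
        simp only [List.mem_singleton] at hbmem
        subst hbmem
        exact fun h => hni (h ▸ ha)
      have hb' : ∀ u ∈ used ++ [idx], 0 ≤ u ∧ u < 26 := by
        intro u hu'
        rcases List.mem_append.mp hu' with h | h
        · exact hb u h
        · simp only [List.mem_singleton] at h; subst h; exact ⟨h0, h26⟩
      rw [pv_erase_avail used idx pos hsome, hposval, hlen]
      exact ih (used ++ [idx]) _ _ hnodup' hb'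

-- the reference loop returns -1 as soon as some char is out of range, already used, or repeated
theorem pv_loop_fail (cs : List Char) : ∀ (used : List Int) (n m : Int),
    ((∃ c ∈ cs, pvIdx c < 0 ∨ 26 ≤ pvIdx c ∨ pvIdx c ∈ used) ∨ ¬ (cs.map pvIdx).Nodup) →
    pvCLoop cs used n m = -1 := by
  induction cs with
  | nil =>
    intro used n m h
    rcases h with ⟨c, hc, _⟩ | h
    · cases hc
    · exact absurd List.nodup_nil h
  | cons c cs ih =>
    intro used n m h
    simp only [pvCLoop]
    by_cases hg : pvIdx c < 0 ∨ 26 ≤ pvIdx c ∨ pvIdx c ∈ used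
    · rw [if_pos hg]
    · rw [if_neg hg]
      push_neg at hg
      apply ih
      rcases h with ⟨c', hc', hbad⟩ | hnd
      · rcases List.mem_cons.mp hc' with rfl | hmem
        · rcases hbad with h1 | h1 | h1
          · omega
          · omega
          · exact absurd h1 hg.2.2
        · left
          refine ⟨c', hmem, ?_⟩
          rcases hbad with h1 | h1 | h1
          · exact Or.inl h1
          · exact Or.inr (Or.inl h1)
          · exact Or.inr (Or.inr (List.mem_append_left _ h1))
      · rw [List.map_cons, List.nodup_cons] at hnd
        push_neg at hnd
        by_cases hmem : pvIdx c ∈ cs.map pvIdx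
        · rcases List.mem_map.mp hmem with ⟨c', hc', hce⟩
          exact Or.inl ⟨c', hc', Or.inr (Or.inr (by
            rw [hce]; exact List.mem_append_right _ (List.mem_singleton_self _)))⟩
        · exact Or.inr (hnd hmem)

-- set(xs) (first occurrences) is a sublist of xs
theorem pv_foldl_add_sublist {α : Type} [BEq α] :
    ∀ (l s : List α), ∃ t, l.foldl PySem.Set.add s = s ++ t ∧ t.Sublist l := by
  intro l
  induction l with
  | nil => intro s; exact ⟨[], by simp, List.nil_sublist _⟩
  | cons x l ih =>
    intro s
    rcases ih (PySem.Set.add s x) with ⟨t, ht, hsub⟩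
    have hcases : PySem.Set.add s x = s ∨ PySem.Set.add s x = s ++ [x] := by
      unfold PySem.Set.add; split <;> simp
    rcases hcases with hadd | hadd <;> rw [hadd] at ht
    · exact ⟨t, by simpa [List.foldl_cons, hadd] using ht, hsub.cons x⟩
    · exact ⟨x :: t, by simpa [List.foldl_cons, hadd, List.append_assoc] using ht, hsub.cons₂ x⟩

theorem pv_ofList_sublist {α : Type} [BEq α] (l : List α) :
    (PySem.Set.ofList l).Sublist l := by
  rcases pv_foldl_add_sublist l [] with ⟨t, ht, hsub⟩
  rw [PySem.Set.ofList_eq_foldl, ht]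
  simpa using hsub

theorem pv_nodup_of_len (l : List Char) (hlen : l.length = 4)
    (hset : (PySem.Set.ofList l).length = 4) : l.Nodup := by
  have hsub := pv_ofList_sublist l
  have heq : PySem.Set.ofList l = l := hsub.eq_of_length (by omega)
  have := PySem.Set.nodup_ofList l
  rwa [heq] at this

theorem pv_idx_inj : Function.Injective pvIdx := by
  intro a b h
  simp only [pvIdx] at h
  have h2 : a.toNat = b.toNat := by omega
  exact Char.ext (UInt32.toNat_inj.mp h2)

-- ===== VERDICT (by name: the statement is the Claim_ definition above) =====
set_option maxHeartbeats 1600000 in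
theorem label_to_idx_py_spec : Claim_equal_label_to_idx_py := by
  intro label _
  unfold Spec_label_to_idx_py label_to_idx_py label_to_idx_py_alt
  by_cases hset : PySem.Set.len (PySem.Set.ofList label.toList) ≠ 4
  · rw [if_pos hset, if_pos (Or.inr hset)]
  · rw [if_neg hset]
    push_neg at hset
    have hsetlen : (PySem.Set.ofList label.toList).length = 4 := by
      simp only [PySem.Set.len] at hset
      exact_mod_cast hset
    have hA0 : pvAvail [] = List.map (fun a : Nat => (a : Int)) (List.range 26) := by
      simp [pvAvail]
    have hAC : pvALoop label.toList (List.map (fun a : Nat => (a : Int)) (List.range 26)) 0 1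
        = pvCLoop label.toList [] 0 1 := by
      rw [← hA0]
      exact pv_loop_eq label.toList [] 0 1 List.nodup_nil (by intro u hu; cases hu)
    by_cases hlen : PySem.Str.len label = 4
    · -- exactly four chars, all distinct
      have hlen4 : label.toList.length = 4 := by
        have := PySem.Str.len_eq label; omega
      have hnd : label.toList.Nodup := pv_nodup_of_len label.toList hlen4 hsetlen
      rw [if_neg (by push_neg; exact ⟨hlen, hset⟩)]
      obtain ⟨c0, c1, c2, c3, hl⟩ : ∃ c0 c1 c2 c3, label.toList = [c0, c1, c2, c3] := by
        match hL : label.toList, hlen4 with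
        | [c0, c1, c2, c3], _ => exact ⟨c0, c1, c2, c3, rfl⟩
      rw [hAC, hl]
      rw [hl] at hnd
      have hndI : ([c0, c1, c2, c3].map pvIdx).Nodup :=
        hnd.map (by intro a b h; exact pv_idx_inj h)
      simp only [List.map_cons, List.map_nil, List.nodup_cons, List.mem_cons,
        List.not_mem_nil, or_false, not_or, List.nodup_nil, and_true,
        not_false_eq_true, pvIdx] at hndI
      obtain ⟨⟨h01, h02, h03⟩, ⟨h12, h13⟩, h23⟩ := hndI
      by_cases hrange : (0 ≤ pvIdx c0 ∧ pvIdx c0 < 26) ∧ (0 ≤ pvIdx c1 ∧ pvIdx c1 < 26)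
          ∧ (0 ≤ pvIdx c2 ∧ pvIdx c2 < 26) ∧ (0 ≤ pvIdx c3 ∧ pvIdx c3 < 26)
      · -- the good case: unroll the reference loop and compare closed forms
        obtain ⟨⟨g00, g01⟩, ⟨g10, g11⟩, ⟨g20, g21⟩, ⟨g30, g31⟩⟩ := hrange
        simp only [pvIdx] at g00 g01 g10 g11 g20 g21 g30 g31
        dsimp only
        rw [if_neg (by omega)]
        simp only [pvCLoop, pvIdx]
        rw [if_neg (by push_neg; refine ⟨by omega, by omega, by simp⟩)]
        rw [if_neg (by push_neg; refine ⟨by omega, by omega, by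
          simp only [List.nil_append, List.mem_singleton]; exact fun h => h01 (by omega)⟩)]
        rw [if_neg (by push_neg; refine ⟨by omega, by omega, by
          simp only [List.nil_append, List.mem_append, List.mem_singleton]
          rintro (h | h)
          · exact h02 (by omega)
          · exact h12 (by omega)⟩)]
        rw [if_neg (by push_neg; refine ⟨by omega, by omega, by
          simp only [List.nil_append, List.mem_append, List.mem_singleton]
          rintro ((h | h) | h)
          · exact h03 (by omega)
          · exact h13 (by omega)
          · exact h23 (by omega)⟩)]
        simp only [pvCLoop, List.nil_append, List.singleton_append, List.cons_append,
          List.filter_cons, List.filter_nil, pvB2I, decide_eq_true_eq]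
        split_ifs <;> simp only [List.length_cons, List.length_nil] <;> push_cast <;> omega
      · -- some char out of 'A'..'Z': both sides return -1
        dsimp only
        rw [if_pos (by
          push_neg at hrange
          simp only [pvIdx] at hrange
          omega)]
        apply pv_loop_fail
        left
        push_neg at hrange
        by_cases r0 : 0 ≤ pvIdx c0 ∧ pvIdx c0 < 26
        · by_cases r1 : 0 ≤ pvIdx c1 ∧ pvIdx c1 < 26
          · by_cases r2 : 0 ≤ pvIdx c2 ∧ pvIdx c2 < 26
            · refine ⟨c3, by simp, ?_⟩
              have := hrange r0 r1 r2
              omega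
            · exact ⟨c2, by simp, by omega⟩
          · exact ⟨c1, by simp, by omega⟩
        · exact ⟨c0, by simp, by omega⟩
    · -- four distinct chars but more than four chars in total: a repeat, both sides -1
      rw [if_pos (Or.inl hlen), hAC]
      apply pv_loop_fail
      right
      intro hndI
      have hnd : label.toList.Nodup := hndI.of_map
      have : PySem.Set.ofList label.toList = label.toList :=
        PySem.Set.ofList_eq_self_of_nodup _ hnd
      rw [this] at hsetlen
      have := PySem.Str.len_eq label
      omega
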